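-- pv_equiv track=rewrite | github.com/NTX-McGill/NeuroTechX-McGill-2019 | offline/visualization/OpenBCI_MI_analysis.py | get_start_indices
-- ===== SOURCE A (Python) =====
-- def get_start_indices(ch):
--     start_indices = [0]
--     i = 0
--     while i < len(ch):
--         if ch[i] > 100:
--             start_indices.append(i)
--             i += 500
--         i += 1
--     return start_indices
-- ===== SOURCE B (Python) =====
-- def get_start_indices(ch):
--     candidates = [i for i in range(len(ch)) if ch[i] > 100]
--     result = [0]
--     next_allowed = 0
--     for i in candidates:
--         if i >= next_allowed:
--             result.append(i)
--             next_allowed = i + 501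
--     return result
-- ===== Notes on version B (the rewrite author's own statement) =====
-- stated objective: alternative
-- what changed: Replaces the interleaved scan-and-jump while-loop by two passes: a comprehension collecting all threshold crossings, then a greedy spacing pass keeping crossings at least 501 apart.
import Mathlib
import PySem

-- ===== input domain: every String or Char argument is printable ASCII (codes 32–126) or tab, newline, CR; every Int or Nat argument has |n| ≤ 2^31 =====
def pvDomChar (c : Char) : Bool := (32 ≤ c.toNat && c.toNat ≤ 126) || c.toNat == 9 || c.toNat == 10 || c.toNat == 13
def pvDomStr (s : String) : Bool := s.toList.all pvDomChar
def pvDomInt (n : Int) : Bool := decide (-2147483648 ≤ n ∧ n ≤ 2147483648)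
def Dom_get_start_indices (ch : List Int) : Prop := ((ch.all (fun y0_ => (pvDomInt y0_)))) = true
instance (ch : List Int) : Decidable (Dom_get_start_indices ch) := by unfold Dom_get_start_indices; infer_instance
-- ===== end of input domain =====

-- B replaces A's single scan-and-jump while-loop by a find-all-crossings pass followed by a
-- greedy 501-spacing pass (objective: alternative decomposition; return values are identical).

-- ===== PORT A =====
-- A's while loop: i only ever in [0, len) when ch[i] is read, so getD is exact here.
def pvGoA (ch : List Int) (i : Nat) (acc : List Int) : List Int :=
  if h : i < ch.length then
    if ch.getD i 0 > 100 then pvGoA ch (i + 501) (acc ++ [(i : Int)])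
    else pvGoA ch (i + 1) acc
  else acc
termination_by ch.length - i
decreasing_by all_goals omega

def get_start_indices (ch : List Int) : List Int := pvGoA ch 0 [0]

-- ===== PORT B =====
-- greedy spacing pass of Source B: keep a candidate iff it is ≥ next_allowed, then bump next_allowed
def pvGoB : List Nat → Nat → List Int → List Int
  | [], _, res => res
  | c :: t, next, res =>
      if next ≤ c then pvGoB t (c + 501) (res ++ [(c : Int)])
      else pvGoB t next res

def get_start_indices_alt (ch : List Int) : List Int :=
  let candidates := (List.range ch.length).filter (fun j => ch.getD j 0 > 100)
  pvGoB candidates 0 [0]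

-- ===== PRECONDITION & SPEC =====
def Spec_get_start_indices (ch : List Int) (out : List Int) : Prop := out = get_start_indices_alt ch
instance (ch : List Int) (out : List Int) : Decidable (Spec_get_start_indices ch out) := by unfold Spec_get_start_indices; infer_instance

-- ===== CLAIM (what is proved, stated in full; the proofs are below) =====
def Claim_equal_get_start_indices : Prop := ∀ (ch : List Int), Dom_get_start_indices ch → Spec_get_start_indices ch (get_start_indices ch)

-- ===== LEMMAS AND PROOFS =====

-- the crossings at positions ≥ i, in order (proof-side recursive characterisation of B's filter)
def pvCands (ch : List Int) (i : Nat) : List Nat :=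
  if _ : i < ch.length then
    (if ch.getD i 0 > 100 then [i] else []) ++ pvCands ch (i + 1)
  else []
termination_by ch.length - i
decreasing_by omega

theorem pvCands_eq_filter (ch : List Int) (i : Nat) :
    pvCands ch i = (List.range' i (ch.length - i)).filter (fun j => ch.getD j 0 > 100) := by
  by_cases h : i < ch.length
  · have hn : ch.length - i = (ch.length - (i + 1)) + 1 := by omega
    rw [pvCands, dif_pos h, pvCands_eq_filter ch (i + 1), hn, List.range'_succ,
      List.filter_cons]
    split_ifs <;> simp_all <;> omega
  · rw [pvCands, dif_neg h]
    have : ch.length - i = 0 := by omega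
    simp [this]
termination_by ch.length - i
decreasing_by omega

theorem pvCands_ge (ch : List Int) (i : Nat) : ∀ x ∈ pvCands ch i, i ≤ x := by
  intro x hx
  rw [pvCands_eq_filter] at hx
  have := List.mem_range'.mp (List.mem_filter.mp hx).1
  omega

-- L4: the crossings ≥ i split as (crossings in [i, j)) ++ (crossings ≥ j)
theorem pvCands_split (ch : List Int) (i j : Nat) (hij : i ≤ j) :
    ∃ l, pvCands ch i = l ++ pvCands ch j ∧ ∀ x ∈ l, x < j := by
  by_cases h : i = j
  · exact ⟨[], by simp [h], by simp⟩
  · have hlt : i < j := by omega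
    by_cases hi : i < ch.length
    · obtain ⟨l, hl, hlx⟩ := pvCands_split ch (i + 1) j (by omega)
      refine ⟨(if ch.getD i 0 > 100 then [i] else []) ++ l, ?_, ?_⟩
      · rw [pvCands, dif_pos hi, hl, List.append_assoc]
      · intro x hx
        rcases List.mem_append.mp hx with hx | hx
        · split at hx <;> simp at hx
          omega
        · exact hlx x hx
    · have hj : ¬ j < ch.length := by omega
      refine ⟨[], ?_, by simp⟩
      rw [pvCands, dif_neg hi, pvCands, dif_neg hj]; simp
termination_by j - i
decreasing_by omega

-- L5: pvGoB skips a prefix of candidates all below next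
theorem pvGoB_skip (l1 l2 : List Nat) (next : Nat) (res : List Int)
    (h : ∀ x ∈ l1, x < next) : pvGoB (l1 ++ l2) next res = pvGoB l2 next res := by
  induction l1 with
  | nil => rfl
  | cons c t ih =>
      have hc : ¬ next ≤ c := by have := h c (by simp); omega
      simp only [List.cons_append, pvGoB, if_neg hc]
      exact ih (fun x hx => h x (by simp [hx]))

-- L6: if all candidates are ≥ m, any two next values ≤ m give the same run
theorem pvGoB_next_irrel (l : List Nat) (m n1 n2 : Nat) (res : List Int)
    (hl : ∀ x ∈ l, m ≤ x) (h1 : n1 ≤ m) (h2 : n2 ≤ m) :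
    pvGoB l n1 res = pvGoB l n2 res := by
  cases l with
  | nil => rfl
  | cons c t =>
      have hc := hl c (by simp)
      simp only [pvGoB, if_pos (by omega : n1 ≤ c), if_pos (by omega : n2 ≤ c)]

-- main invariant: A's loop from i equals B's greedy pass over the crossings ≥ i with next = i
theorem pvGoA_eq (ch : List Int) (i : Nat) (acc : List Int) :
    pvGoA ch i acc = pvGoB (pvCands ch i) i acc := by
  by_cases h : i < ch.length
  · rw [pvGoA, dif_pos h, pvCands, dif_pos h]
    by_cases hc : ch.getD i 0 > 100
    · rw [if_pos hc, if_pos hc]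
      simp only [List.singleton_append, pvGoB, if_pos (le_refl i)]
      obtain ⟨l, hl, hlx⟩ := pvCands_split ch (i + 1) (i + 501) (by omega)
      rw [pvGoA_eq ch (i + 501), hl, pvGoB_skip l _ _ _ (fun x hx => hlx x hx)]
    · rw [if_neg hc, if_neg hc]
      simp only [List.nil_append]
      rw [pvGoA_eq ch (i + 1)]
      exact pvGoB_next_irrel _ (i + 1) (i + 1) i _ (pvCands_ge ch (i + 1)) (le_refl _) (by omega)
  · rw [pvGoA, dif_neg h, pvCands, dif_neg h]; rfl
termination_by ch.length - i
decreasing_by all_goals omega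

-- ===== VERDICT (by name: the statement is the Claim_ definition above) =====
theorem get_start_indices_spec : Claim_equal_get_start_indices := by
  intro ch _
  show get_start_indices ch = get_start_indices_alt ch
  unfold get_start_indices get_start_indices_alt
  rw [pvGoA_eq, pvCands_eq_filter]
  simp [List.range_eq_range']
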